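-- pv_equiv track=rewrite | github.com/greenkey/adventofcode | 2019/06/solve.py | transfers
-- ===== SOURCE A (Python) =====
-- from typing import Dict, List
--
-- def transfers(reverse_map: Dict[str, List[str]], a: str, b: str) -> int:
--     path_a: List[str] = []
--     path_b: List[str] = []
--     while True:
--         a = reverse_map.get(a)
--         if a in path_b:
--             return len(path_a) + path_b.index(a)
--         path_a.append(a)
--
--         b = reverse_map.get(b)
--         if b in path_a:
--             return len(path_b) + path_a.index(b)
--         path_b.append(b)
-- ===== SOURCE B (Python) =====
-- def transfers(reverse_map, a, b):
--     # One pass up from a recording each ancestor's distance in a dict,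
--     # then walk b upward until it reaches an ancestor already seen.
--     dist = {}
--     node = reverse_map.get(a)
--     d = 0
--     while node not in dist:
--         dist[node] = d
--         if node is None:
--             break
--         node = reverse_map.get(node)
--         d += 1
--     node = reverse_map.get(b)
--     d = 0
--     while node not in dist:
--         node = reverse_map.get(node)
--         d += 1
--     return dist[node] + d
-- ===== Notes on version B (the rewrite author's own statement) =====
-- stated objective: alternative
-- what changed: Replaced A's interleaved two-path walk with an 'a in path_b' list scan per step by a dict of ancestor distances built in one pass up from a, then a single upward walk from b with dict lookups; Pre_ excludes maps whose parent chain from a or b is cyclic: such maps are outside the orbit-tree domain, A loops forever on them unless the two chains happen to meet inside the cycle, and where it does return, A's interleaved meeting point and B's sequential one are two equally arbitrary answers that no one would specify.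
-- outside the precondition, e.g. on transfers({'A': 'C', 'B': 'A', 'C': 'B'}, 'B', 'C'): A returns 1, B returns 2
import Mathlib
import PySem

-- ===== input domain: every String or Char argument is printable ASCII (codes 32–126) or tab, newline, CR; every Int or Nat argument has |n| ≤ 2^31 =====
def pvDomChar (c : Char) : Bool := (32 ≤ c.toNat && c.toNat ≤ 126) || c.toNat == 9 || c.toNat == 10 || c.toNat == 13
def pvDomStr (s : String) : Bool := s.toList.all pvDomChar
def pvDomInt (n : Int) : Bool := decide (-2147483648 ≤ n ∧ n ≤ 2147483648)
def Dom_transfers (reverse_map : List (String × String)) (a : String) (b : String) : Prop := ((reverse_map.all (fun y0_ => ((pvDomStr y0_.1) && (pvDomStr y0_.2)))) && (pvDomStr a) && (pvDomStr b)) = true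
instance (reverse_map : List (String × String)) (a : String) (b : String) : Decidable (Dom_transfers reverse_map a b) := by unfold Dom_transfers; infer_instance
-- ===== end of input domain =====

-- B replaces A's interleaved two-path walk (with a linear list scan per step) by one upward
-- pass from `a` recording ancestor distances in a dict, then a single upward walk from `b`.
-- `reverse_map.get(k)` on the current node (None once the root is passed):
def pstep (rm : List (String × String)) (o : Option String) : Option String :=
  match o with
  | some s => PySem.Dict.get? (PySem.Dict.ofList rm) s
  | none => none

-- ===== PORT A =====
-- the `while True` loop of A; fuel only makes it total, it is never exhausted on Pre_ inputs
def transfersLoop (rm : List (String × String)) : Nat → Option String → Option String →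
    List (Option String) → List (Option String) → Int
  | 0, _, _, _, _ => 0
  | f+1, a, b, path_a, path_b =>
    let a' := pstep rm a
    match PySem.List.index? path_b a' with
    | some i => (path_a.length : Int) + (i : Int)
    | none =>
      let path_a' := path_a ++ [a']
      let b' := pstep rm b
      match PySem.List.index? path_a' b' with
      | some i => (path_b.length : Int) + (i : Int)
      | none => transfersLoop rm f a' b' path_a' (path_b ++ [b'])

def transfers (reverse_map : List (String × String)) (a : String) (b : String) : Int :=
  transfersLoop reverse_map (reverse_map.length + 2) (some a) (some b) [] []

-- ===== PORT B =====
-- first loop of Source B: walk up from a, storing dist[node] = d (fuel = totality only)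
def altBuild (rm : List (String × String)) : Nat → Option String → Int →
    PySem.Dict (Option String) Int → PySem.Dict (Option String) Int
  | 0, _, _, dist => dist
  | f+1, node, d, dist =>
    if dist.contains node then dist
    else
      let dist' := dist.insert node d
      match node with
      | none => dist'
      | some _ => altBuild rm f (pstep rm node) (d+1) dist'

-- second loop of Source B: walk up from b until a node in dist; returns dist[node] + d
def altWalk (rm : List (String × String)) (dist : PySem.Dict (Option String) Int) :
    Nat → Option String → Int → Int
  | 0, _, _ => 0
  | f+1, node, d =>
    match dist.get? node with
    | some v => v + d
    | none => altWalk rm dist f (pstep rm node) (d+1)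

def transfers_alt (reverse_map : List (String × String)) (a : String) (b : String) : Int :=
  let dist := altBuild reverse_map (reverse_map.length + 2) (pstep reverse_map (some a)) 0 PySem.Dict.empty
  altWalk reverse_map dist (reverse_map.length + 2) (pstep reverse_map (some b)) 0

-- ===== PRECONDITION & SPEC =====
-- Pre_ excludes maps whose parent chain from a or b is cyclic (never reaches None): such maps
-- are outside the orbit-tree domain this function is for — A loops forever on them unless the
-- two chains happen to meet inside the cycle, and where A does return there, A's interleaved
-- meeting point and B's sequential one are two equally arbitrary, both defensible answers
-- (see the cited excluded example, where A returns 1 and B returns 2).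
def Pre_transfers (reverse_map : List (String × String)) (a : String) (b : String) : Prop :=
  (pstep reverse_map)^[reverse_map.length + 1] (some a) = none ∧
  (pstep reverse_map)^[reverse_map.length + 1] (some b) = none

instance (reverse_map : List (String × String)) (a : String) (b : String) : Decidable (Pre_transfers reverse_map a b) := by unfold Pre_transfers; infer_instance

def pvWitness_transfers : (List (String × String)) × String × String :=
  ([("A", "COM"), ("B", "A")], "A", "B")

def Spec_transfers (reverse_map : List (String × String)) (a : String) (b : String) (out : Int) : Prop := out = transfers_alt reverse_map a b
instance (reverse_map : List (String × String)) (a : String) (b : String) (out : Int) : Decidable (Spec_transfers reverse_map a b out) := by unfold Spec_transfers; infer_instance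

-- ===== CLAIM (what is proved, stated in full; the proofs are below) =====
def Claim_equal_transfers : Prop := ∀ (reverse_map : List (String × String)) (a : String) (b : String), Dom_transfers reverse_map a b → Pre_transfers reverse_map a b → Spec_transfers reverse_map a b (transfers reverse_map a b)

-- ===== LEMMAS AND PROOFS =====

theorem pstep_none (rm : List (String × String)) : pstep rm none = none := rfl

theorem chain_stable (rm : List (String × String)) (x : Option String) {k m : Nat}
    (h : (pstep rm)^[k] x = none) (hkm : k ≤ m) : (pstep rm)^[m] x = none := by
  obtain ⟨d, rfl⟩ := Nat.exists_eq_add_of_le hkm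
  rw [Nat.add_comm, Function.iterate_add_apply, h, Function.iterate_fixed (pstep_none rm)]

theorem chain_inj (rm : List (String × String)) (x : Option String) (la : Nat)
    (hla : (pstep rm)^[la] x = none) (hmin : ∀ k < la, (pstep rm)^[k] x ≠ none)
    {i j : Nat} (hij : i < j) (hj : j ≤ la) :
    (pstep rm)^[i] x ≠ (pstep rm)^[j] x := by
  intro he
  apply hmin (la - (j - i)) (by omega)
  have h1 : la - (j - i) = (la - j) + i := by omega
  rw [h1, Function.iterate_add_apply, he, ← Function.iterate_add_apply]
  have h2 : la - j + j = la := by omega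
  rw [h2]; exact hla

-- first-k ancestor-distance table lookup: what dist holds after k insertions
def lk (rm : List (String × String)) (a : String) (m : Nat) (o : Option String) : Option Int :=
  (PySem.List.index? ((List.range m).map (fun i => (pstep rm)^[i+1] (some a))) o).map (fun i => (i : Int))

theorem build_spec (rm : List (String × String)) (a : String) (la : Nat)
    (hla : (pstep rm)^[la] (some a) = none) (hmin : ∀ k < la, (pstep rm)^[k] (some a) ≠ none) :
    ∀ (F k : Nat) (dist : PySem.Dict (Option String) Int), k < la → la ≤ k + F →
    (∀ o, dist.get? o = lk rm a k o) →
    ∀ o, (altBuild rm F ((pstep rm)^[k+1] (some a)) (k : Int) dist).get? o = lk rm a la o := by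
  intro F
  induction F with
  | zero => intro k dist h1 h2; omega
  | succ F ih =>
    intro k dist hk hF hdist o
    have hfresh : (pstep rm)^[k+1] (some a) ∉ (List.range k).map (fun i => (pstep rm)^[i+1] (some a)) := by
      simp only [List.mem_map, List.mem_range]
      rintro ⟨i, hi, he⟩
      exact chain_inj rm (some a) la hla hmin (i := i+1) (j := k+1) (by omega) (by omega) he
    have hnone : dist.get? ((pstep rm)^[k+1] (some a)) = none := by
      rw [hdist]
      unfold lk
      rw [(PySem.List.index?_eq_none_iff _ _).mpr hfresh]
      rfl
    have hcont : dist.contains ((pstep rm)^[k+1] (some a)) = false := by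
      rw [PySem.Dict.contains_eq_isSome_get?, hnone]; rfl
    have hdist' : ∀ o', (dist.insert ((pstep rm)^[k+1] (some a)) (k : Int)).get? o' = lk rm a (k+1) o' := by
      intro o'
      rw [PySem.Dict.get?_insert]
      unfold lk
      rw [List.range_succ, List.map_append, List.map_singleton]
      by_cases hmem : o' ∈ (List.range k).map (fun i => (pstep rm)^[i+1] (some a))
      · have hne : o' ≠ (pstep rm)^[k+1] (some a) := fun he => hfresh (he ▸ hmem)
        rw [if_neg hne, PySem.List.index?_append_of_mem _ hmem, hdist o']
        rfl
      · by_cases heq : o' = (pstep rm)^[k+1] (some a)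
        · subst heq
          rw [if_pos rfl, PySem.List.index?_append_singleton_self _ _ hfresh]
          simp
        · rw [if_neg heq]
          have : o' ∉ ((List.range k).map (fun i => (pstep rm)^[i+1] (some a))) ++ [(pstep rm)^[k+1] (some a)] := by
            simp only [List.mem_append, List.mem_singleton]
            rintro (h | h) <;> [exact hmem h; exact heq h]
          rw [(PySem.List.index?_eq_none_iff _ _).mpr this, hdist o']
          unfold lk
          rw [(PySem.List.index?_eq_none_iff _ _).mpr hmem]
    rcases hcase : (pstep rm)^[k+1] (some a) with _ | s
    · rw [hcase] at hcont hdist'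
      have hla' : la = k + 1 := by
        have := hmin (k+1)
        rcases Nat.lt_or_ge (k+1) la with h | h
        · exact absurd hcase (this h)
        · omega
      simp only [altBuild, hcont, Bool.false_eq_true, if_false]
      rw [hdist' o, hla']
    · have hlt : k + 1 < la := by
        rcases Nat.lt_or_ge (k+1) la with h | h
        · exact h
        · exact absurd (chain_stable rm (some a) hla h) (by rw [hcase]; simp)
      have hstep : pstep rm ((pstep rm)^[k+1] (some a)) = (pstep rm)^[(k+1)+1] (some a) :=
        (Function.iterate_succ_apply' (pstep rm) (k+1) (some a)).symm
      rw [hcase] at hcont hdist' hstep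
      simp only [altBuild, hcont, Bool.false_eq_true, if_false]
      rw [hstep]
      have hc : ((k : Int) + 1) = (((k+1 : Nat)) : Int) := by push_cast; ring
      rw [hc]
      exact ih (k+1) _ hlt (by omega) hdist' o

theorem walk_spec (rm : List (String × String)) (dist : PySem.Dict (Option String) Int)
    (b : String) (g : Option String → Option Int) (hg : ∀ o, dist.get? o = g o)
    (js : Nat) (t : Int) (hjs : g ((pstep rm)^[js+1] (some b)) = some t)
    (hlt : ∀ j < js, g ((pstep rm)^[j+1] (some b)) = none) :
    ∀ (F j : Nat), j ≤ js → js < j + F →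
    altWalk rm dist F ((pstep rm)^[j+1] (some b)) (j : Int) = t + (js : Int) := by
  intro F
  induction F with
  | zero => intro j h1 h2; omega
  | succ F ih =>
    intro j h1 h2
    rcases Nat.lt_or_ge j js with hlt' | hge
    · have hn : dist.get? ((pstep rm)^[j+1] (some b)) = none := by
        rw [hg]; exact hlt j hlt'
      have step : pstep rm ((pstep rm)^[j+1] (some b)) = (pstep rm)^[(j+1)+1] (some b) :=
        (Function.iterate_succ_apply' (pstep rm) (j+1) (some b)).symm
      simp only [altWalk, hn]
      rw [step]
      have : ((j : Int) + 1) = (((j+1 : Nat)) : Int) := by push_cast; ring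
      rw [this]
      exact ih (j+1) (by omega) (by omega)
    · have hj : j = js := by omega
      subst hj
      have hs : dist.get? ((pstep rm)^[j+1] (some b)) = some t := by rw [hg]; exact hjs
      simp only [altWalk, hs]

theorem index?_map_range_eq_some (w : Nat → Option String) (m t : Nat) (htm : t < m)
    (hmin : ∀ i < t, w i ≠ w t) :
    PySem.List.index? ((List.range m).map w) (w t) = some t := by
  rw [PySem.List.index?_eq_some_iff]
  refine ⟨(List.range t).map w, (List.range' (t+1) (m-t-1)).map w, ?_, by simp, ?_⟩
  · have hr : List.range m = List.range t ++ t :: List.range' (t+1) (m-t-1) := by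
      have e1 : List.range' t (m - t) 1 = t :: List.range' (t+1) (m-t-1) 1 := by
        have h3 : m - t = (m - t - 1) + 1 := by omega
        conv_lhs => rw [h3, List.range'_succ]
      have e2 : List.range' 0 t 1 ++ List.range' (0 + 1 * t) (m - t) 1 = List.range' 0 (t + (m - t)) 1 :=
        List.range'_append
      have h2 : t + (m - t) = m := by omega
      have h4 : 0 + 1 * t = t := by omega
      rw [h2, h4] at e2
      rw [List.range_eq_range', ← e2, e1, List.range_eq_range']
    rw [hr]
    simp
  · simp only [List.mem_map, List.mem_range]
    rintro ⟨i, hi, he⟩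
    exact hmin i hi he

theorem loopA_spec (rm : List (String × String)) (a b : String) (la js t : Nat)
    (hla : (pstep rm)^[la] (some a) = none)
    (hmina : ∀ k < la, (pstep rm)^[k] (some a) ≠ none)
    (hnk : (none : Option String) ∈ (List.range la).map (fun i => (pstep rm)^[i+1] (some a)))
    (hjmem : (pstep rm)^[t+1] (some a) = (pstep rm)^[js+1] (some b))
    (ht : t < la)
    (hjsmin : ∀ j < js, (pstep rm)^[j+1] (some b) ∉ (List.range la).map (fun i => (pstep rm)^[i+1] (some a)))
    (htmin : ∀ i < t, (pstep rm)^[i+1] (some a) ≠ (pstep rm)^[js+1] (some b)) :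
    ∀ (F k : Nat), k < max (t+1) (js+1) → max (t+1) (js+1) ≤ k + F →
    transfersLoop rm F ((pstep rm)^[k] (some a)) ((pstep rm)^[k] (some b))
      ((List.range k).map (fun i => (pstep rm)^[i+1] (some a)))
      ((List.range k).map (fun i => (pstep rm)^[i+1] (some b))) = (t : Int) + (js : Int) := by
  -- abbreviations via local facts
  have ult : ∀ m, (pstep rm)^[m] (some a) ≠ none → m < la := by
    intro m h
    by_contra hge
    exact h (chain_stable rm (some a) hla (by omega))
  have hukeys : ∀ i, i < la → (pstep rm)^[i+1] (some a) ∈ (List.range la).map (fun i => (pstep rm)^[i+1] (some a)) := by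
    intro i hi
    simp only [List.mem_map, List.mem_range]
    exact ⟨i, hi, rfl⟩
  have hjsle : ∀ j, (pstep rm)^[j+1] (some b) ∈ (List.range la).map (fun i => (pstep rm)^[i+1] (some a)) → js ≤ j := by
    intro j hj
    by_contra hlt
    exact hjsmin j (by omega) hj
  have shift : ∀ j, js ≤ j → (pstep rm)^[j+1] (some b) = (pstep rm)^[(j - js) + (t+1)] (some a) := by
    intro j hj
    have h1 : j + 1 = (j - js) + (js + 1) := by omega
    rw [h1, Function.iterate_add_apply, ← hjmem, ← Function.iterate_add_apply]
  have hinj : ∀ i j : Nat, i ≤ la → j ≤ la → (pstep rm)^[i] (some a) = (pstep rm)^[j] (some a) → i = j := by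
    intro i j hi hj he
    rcases Nat.lt_trichotomy i j with h | h | h
    · exact absurd he (chain_inj rm (some a) la hla hmina h hj)
    · exact h
    · exact absurd he.symm (chain_inj rm (some a) la hla hmina h hi)
  intro F
  induction F with
  | zero => intro k h1 h2; omega
  | succ F ih =>
    intro k hk hF
    have hstepA : pstep rm ((pstep rm)^[k] (some a)) = (pstep rm)^[k+1] (some a) :=
      (Function.iterate_succ_apply' (pstep rm) k (some a)).symm
    have hstepB : pstep rm ((pstep rm)^[k] (some b)) = (pstep rm)^[k+1] (some b) :=
      (Function.iterate_succ_apply' (pstep rm) k (some b)).symm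
    have hpa : ((List.range k).map (fun i => (pstep rm)^[i+1] (some a))) ++ [(pstep rm)^[k+1] (some a)]
        = (List.range (k+1)).map (fun i => (pstep rm)^[i+1] (some a)) := by
      rw [List.range_succ, List.map_append, List.map_singleton]
    have hpb : ((List.range k).map (fun i => (pstep rm)^[i+1] (some b))) ++ [(pstep rm)^[k+1] (some b)]
        = (List.range (k+1)).map (fun i => (pstep rm)^[i+1] (some b)) := by
      rw [List.range_succ, List.map_append, List.map_singleton]
    rcases Nat.lt_or_ge (k+1) (max (t+1) (js+1)) with hkT | hkT
    · -- neither test fires: recurse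
      have hC1 : PySem.List.index? ((List.range k).map (fun i => (pstep rm)^[i+1] (some b)))
          ((pstep rm)^[k+1] (some a)) = none := by
        rw [PySem.List.index?_eq_none_iff]
        simp only [List.mem_map, List.mem_range]
        rintro ⟨j, hj, hveq⟩
        by_cases hun : (pstep rm)^[k+1] (some a) = none
        · have h1 : la ≤ k + 1 := by
            by_contra h
            exact hmina (k+1) (by omega) hun
          have h2 : js ≤ j := hjsle j (by rw [hveq, hun]; exact hnk)
          omega
        · have hkla : k + 1 < la := ult _ hun
          have h2 : js ≤ j := hjsle j (by rw [hveq]; exact hukeys k (by omega))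
          have h3 : (pstep rm)^[k+1] (some a) = (pstep rm)^[(j - js) + (t+1)] (some a) := by
            rw [← hveq]; exact shift j h2
          have h4 : (j - js) + (t+1) < la := ult _ (by rw [← h3]; exact hun)
          have := hinj (k+1) ((j - js) + (t+1)) (by omega) (by omega) h3
          omega
      have hC2 : PySem.List.index? ((List.range (k+1)).map (fun i => (pstep rm)^[i+1] (some a)))
          ((pstep rm)^[k+1] (some b)) = none := by
        rw [PySem.List.index?_eq_none_iff]
        simp only [List.mem_map, List.mem_range]
        rintro ⟨i, hi, hueq⟩
        by_cases hvn : (pstep rm)^[k+1] (some b) = none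
        · have h1 : la ≤ i + 1 := by
            by_contra h
            exact hmina (i+1) (by omega) (hueq.trans hvn)
          have h2 : js ≤ k := hjsle k (by rw [hvn]; exact hnk)
          omega
        · have hila : i + 1 < la := ult _ (by rw [hueq]; exact hvn)
          have h2 : js ≤ k := hjsle k (by rw [← hueq]; exact hukeys i (by omega))
          have h3 : (pstep rm)^[i+1] (some a) = (pstep rm)^[(k - js) + (t+1)] (some a) := by
            rw [hueq]; exact shift k h2
          have h4 : (k - js) + (t+1) < la := ult _ (by rw [← h3, hueq]; exact hvn)
          have := hinj (i+1) ((k - js) + (t+1)) (by omega) (by omega) h3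
          omega
      simp only [transfersLoop, hstepA, hstepB, hpa, hpb, hC1, hC2]
      exact ih (k+1) hkT (by omega)
    · -- the loop returns at this iteration
      have hkT' : k + 1 = max (t+1) (js+1) := by omega
      rcases Nat.lt_or_ge js t with hcmp | hcmp
      · -- check 1 fires (k = t)
        have hkt : k = t := by omega
        subst hkt
        have hC1 : PySem.List.index? ((List.range k).map (fun i => (pstep rm)^[i+1] (some b)))
            ((pstep rm)^[k+1] (some a)) = some js := by
          rw [hjmem]
          have := index?_map_range_eq_some (fun j => (pstep rm)^[j+1] (some b)) k js (by omega)
            (by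
              intro j hj he
              apply hjsmin j hj
              have he' : (pstep rm)^[j+1] (some b) = (pstep rm)^[js+1] (some b) := he
              rw [he', ← hjmem]
              exact hukeys k ht)
          exact this
        simp only [transfersLoop, hstepA, hC1]
        simp
      · -- check 2 fires (k = js)
        have hkjs : k = js := by omega
        subst hkjs
        have hC1 : PySem.List.index? ((List.range k).map (fun i => (pstep rm)^[i+1] (some b)))
            ((pstep rm)^[k+1] (some a)) = none := by
          rw [PySem.List.index?_eq_none_iff]
          simp only [List.mem_map, List.mem_range]
          rintro ⟨j, hj, hveq⟩
          by_cases hun : (pstep rm)^[k+1] (some a) = none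
          · exact hjsmin j (by omega) (by rw [hveq, hun]; exact hnk)
          · have hkla : k + 1 < la := ult _ hun
            exact hjsmin j (by omega) (by rw [hveq]; exact hukeys k (by omega))
        have hC2 : PySem.List.index? ((List.range (k+1)).map (fun i => (pstep rm)^[i+1] (some a)))
            ((pstep rm)^[k+1] (some b)) = some t := by
          rw [← hjmem]
          exact index?_map_range_eq_some (fun i => (pstep rm)^[i+1] (some a)) (k+1) t (by omega)
            (by
              intro i hi he
              have he' : (pstep rm)^[i+1] (some a) = (pstep rm)^[t+1] (some a) := he
              exact htmin i hi (by rw [← hjmem]; exact he'))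
        simp only [transfersLoop, hstepA, hstepB, hpa, hC1, hC2]
        simp only [List.length_map, List.length_range]
        ring

theorem transfers_eq_aux (rm : List (String × String)) (a b : String)
    (hpa : (pstep rm)^[rm.length + 1] (some a) = none)
    (hpb : (pstep rm)^[rm.length + 1] (some b) = none) :
    transfers rm a b = transfers_alt rm a b := by
  have hexa : ∃ k, (pstep rm)^[k] (some a) = none := ⟨rm.length+1, hpa⟩
  have hexb : ∃ k, (pstep rm)^[k] (some b) = none := ⟨rm.length+1, hpb⟩
  set la := Nat.find hexa with hladef
  set lb := Nat.find hexb with hlbdef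
  have hla : (pstep rm)^[la] (some a) = none := Nat.find_spec hexa
  have hlb : (pstep rm)^[lb] (some b) = none := Nat.find_spec hexb
  have hmina : ∀ k < la, (pstep rm)^[k] (some a) ≠ none := fun k hk => Nat.find_min hexa hk
  have hminb : ∀ k < lb, (pstep rm)^[k] (some b) ≠ none := fun k hk => Nat.find_min hexb hk
  have hlale : la ≤ rm.length + 1 := Nat.find_le hpa
  have hlble : lb ≤ rm.length + 1 := Nat.find_le hpb
  have hla1 : 1 ≤ la := by
    by_contra h
    have h0 : la = 0 := by omega
    rw [h0] at hla
    simp at hla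
  have hlb1 : 1 ≤ lb := by
    by_contra h
    have h0 : lb = 0 := by omega
    rw [h0] at hlb
    simp at hlb
  have hnk : (none : Option String) ∈ (List.range la).map (fun i => (pstep rm)^[i+1] (some a)) := by
    simp only [List.mem_map, List.mem_range]
    exact ⟨la - 1, by omega, by rw [show la - 1 + 1 = la by omega]; exact hla⟩
  have hexj : ∃ j, (pstep rm)^[j+1] (some b) ∈ (List.range la).map (fun i => (pstep rm)^[i+1] (some a)) := by
    refine ⟨lb - 1, ?_⟩
    rw [show lb - 1 + 1 = lb by omega, hlb]
    exact hnk
  set js := Nat.find hexj with hjsdef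
  have hjs : (pstep rm)^[js+1] (some b) ∈ (List.range la).map (fun i => (pstep rm)^[i+1] (some a)) :=
    Nat.find_spec hexj
  have hjsmin : ∀ j < js, (pstep rm)^[j+1] (some b) ∉ (List.range la).map (fun i => (pstep rm)^[i+1] (some a)) :=
    fun j hj => Nat.find_min hexj hj
  have hjsle : js ≤ lb - 1 := Nat.find_le (by
    rw [show lb - 1 + 1 = lb by omega, hlb]
    exact hnk)
  have hsome : (PySem.List.index? ((List.range la).map (fun i => (pstep rm)^[i+1] (some a)))
      ((pstep rm)^[js+1] (some b))).isSome :=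
    (PySem.List.index?_isSome_iff _ _).mpr hjs
  obtain ⟨t, hidx⟩ := Option.isSome_iff_exists.mp hsome
  obtain ⟨hkt, hkeq, hkmin⟩ := PySem.List.getElem_of_index?_eq_some hidx
  have ht : t < la := by simpa using hkt
  have hjmem : (pstep rm)^[t+1] (some a) = (pstep rm)^[js+1] (some b) := by
    have := hkeq
    simpa using this
  have htmin : ∀ i < t, (pstep rm)^[i+1] (some a) ≠ (pstep rm)^[js+1] (some b) := by
    intro i hi he
    have := hkmin i (by simpa using (by omega : i < t))
    simp at this
    exact this he
  have hA : transfers rm a b = (t : Int) + (js : Int) := by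
    unfold transfers
    have hres := loopA_spec rm a b la js t hla hmina hnk hjmem ht hjsmin htmin
      (rm.length + 2) 0 (by omega) (by omega)
    simpa using hres
  have hlk0 : ∀ o, (PySem.Dict.empty : PySem.Dict (Option String) Int).get? o = lk rm a 0 o := by
    intro o
    rw [PySem.Dict.get?_empty]
    unfold lk
    rw [(PySem.List.index?_eq_none_iff _ _).mpr (by simp)]
    rfl
  have hdist : ∀ o, (altBuild rm (rm.length + 2) ((pstep rm)^[0+1] (some a)) ((0 : Nat) : Int)
      PySem.Dict.empty).get? o = lk rm a la o :=
    build_spec rm a la hla hmina (rm.length + 2) 0 PySem.Dict.empty (by omega) (by omega) hlk0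
  have hjs' : lk rm a la ((pstep rm)^[js+1] (some b)) = some (t : Int) := by
    unfold lk
    rw [hidx]
    rfl
  have hlt' : ∀ j < js, lk rm a la ((pstep rm)^[j+1] (some b)) = none := by
    intro j hj
    unfold lk
    rw [(PySem.List.index?_eq_none_iff _ _).mpr (hjsmin j hj)]
    rfl
  have hB : transfers_alt rm a b = (t : Int) + (js : Int) := by
    unfold transfers_alt
    have hdist' := hdist
    simp only [Nat.zero_add, Function.iterate_one, Nat.cast_zero] at hdist'
    have hw := walk_spec rm _ b (lk rm a la) hdist' js (t : Int) hjs' hlt'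
      (rm.length + 2) 0 (by omega) (by omega)
    simpa using hw
  rw [hA, hB]

-- ===== VERDICT (by name: the statement is the Claim_ definition above) =====
theorem transfers_spec : Claim_equal_transfers := by
  intro rm a b _hdom hpre
  exact transfers_eq_aux rm a b hpre.1 hpre.2
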